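-- pv_equiv track=rewrite | github.com/Lavaman002-spec/BizRay-SchultzDavid | backend/services/ingest/etl/bulk_api_ingest.py | _get_sample_companies
-- ===== SOURCE A (Python) =====
-- from typing import List, Dict, Optional
--
-- def _get_sample_companies(max_count: int = 100) -> List[str]:
--     """
--     Get a predefined sample of known Austrian companies.
--
--     Austrian FNRs have a specific format: up to 6 digits + SPACE + check character
--     Example: "348406 m", "10001 a", "50234 m", etc.
--
--     IMPORTANT: Based on actual API responses, the format is "NNNNNN m" (with space!)
--
--     Args:
--         max_count: Maximum number of companies to return
--
--     Returns:
--         List of company register IDs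
--     """
--     sample_companies = []
--
--     # Most common check character is 'm', but we'll use a variety
--     # Note: From API examples, 'm' is most common
--     check_chars = ['m', 'a', 'b', 'v', 'w', 'x', 'y', 'z', 't', 'h', 'd', 'f']
--
--     # Generate FNRs across different ranges (max 6 digits = 999999)
--     # We'll sample strategically across ranges more likely to have companies
--     ranges = [
--         (1, 1000, 10),          # Very early registrations (every 10th)
--         (1000, 10000, 50),      # Early companies (every 50th)
--         (10000, 50000, 100),    # Growing phase (every 100th)
--         (50000, 100000, 200),   # Expansion (every 200th)
--         (100000, 200000, 300),  # Mid-range (every 300th)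
--         (200000, 400000, 500),  # Higher range (every 500th)
--         (400000, 600000, 800),  # Recent registrations (every 800th)
--     ]
--
--     char_index = 0
--     for start, end, step in ranges:
--         if len(sample_companies) >= max_count:
--             break
--
--         for fnr_num in range(start, min(end, 1000000), step):  # Max 6 digits = 999999
--             if len(sample_companies) >= max_count:
--                 break
--
--             # Ensure we don't exceed 6 digits
--             if fnr_num > 999999:
--                 break
--
--             # Add check character (use 'm' more frequently as it's most common)
--             if char_index % 3 == 0:  # Every 3rd uses 'm'
--                 check_char = 'm'
--             else:
--                 check_char = check_chars[char_index % len(check_chars)]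
--
--             # IMPORTANT: Add space before check character (this is the correct format!)
--             fnr = f"{fnr_num} {check_char}"
--             sample_companies.append(fnr)
--             char_index += 1
--
--     return sample_companies[:max_count]
-- ===== SOURCE B (Python) =====
-- from typing import List
--
--
-- def _get_sample_companies(max_count: int = 100) -> List[str]:
--     """Index-driven re-implementation: the output is a prefix of a fixed
--     virtual table, so compute each entry directly from its index i —
--     locate i's range via precomputed range lengths (closed form, no number
--     stream is generated or truncated), n = start + offset*step, and the
--     check character from i % 3 / i % 12."""
--     check_chars = ['m', 'a', 'b', 'v', 'w', 'x', 'y', 'z', 't', 'h', 'd', 'f']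
--     ranges = [
--         (1, 1000, 10),
--         (1000, 10000, 50),
--         (10000, 50000, 100),
--         (50000, 100000, 200),
--         (100000, 200000, 300),
--         (200000, 400000, 500),
--         (400000, 600000, 800),
--     ]
--     lens = [(e - s + st - 1) // st for s, e, st in ranges]
--     total = sum(lens)
--
--     def fnr(i: int) -> int:
--         for (s, _e, st), length in zip(ranges, lens):
--             if i < length:
--                 return s + i * st
--             i -= length
--         return 0  # unreachable: i < total
--
--     result = []
--     for i in range(min(max(max_count, 0), total)):
--         c = 'm' if i % 3 == 0 else check_chars[i % 12]
--         result.append(f"{fnr(i)} {c}")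
--     return result
-- ===== Notes on version B (the rewrite author's own statement) =====
-- stated objective: alternative
-- what changed: Instead of generating and truncating a number stream with threaded loop state, B computes each output entry directly from its index: range lengths are precomputed in closed form ((e-s+st-1)//st), the clamped output size min(max(max_count,0), total) is known up front, and fnr(i) locates index i's range by subtracting lengths and returns start + offset*step.
import Mathlib
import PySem

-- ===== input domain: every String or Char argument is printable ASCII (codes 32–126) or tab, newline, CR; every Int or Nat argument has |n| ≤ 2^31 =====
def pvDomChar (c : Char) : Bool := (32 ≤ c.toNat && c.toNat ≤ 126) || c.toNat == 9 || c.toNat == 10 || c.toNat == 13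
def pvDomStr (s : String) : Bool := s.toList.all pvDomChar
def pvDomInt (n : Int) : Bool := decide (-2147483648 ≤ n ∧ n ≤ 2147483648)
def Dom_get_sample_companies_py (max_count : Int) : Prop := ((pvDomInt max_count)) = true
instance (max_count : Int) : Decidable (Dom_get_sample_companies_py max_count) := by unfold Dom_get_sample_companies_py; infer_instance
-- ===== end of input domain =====

-- B replaces A's stream generation with threaded state by direct per-index computation:
-- range lengths in closed form, output size known up front, entry i located by index
-- arithmetic (objective: alternative decomposition).

-- ===== PORT A =====
def pvCheckChars : List String := ["m", "a", "b", "v", "w", "x", "y", "z", "t", "h", "d", "f"]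

def pvRangesA : List (Int × Int × Int) :=
  [(1, 1000, 10), (1000, 10000, 50), (10000, 50000, 100), (50000, 100000, 200),
   (100000, 200000, 300), (200000, 400000, 500), (400000, 600000, 800)]

-- inner `for fnr_num in range(...)` loop of A; state = (sample_companies, char_index).
-- `check_chars[char_index % len(check_chars)]`: index always in range, `.getD ""` is never hit.
def pvInnerA : List Int → List String → Int → Int → (List String × Int)
  | [], acc, ci, _ => (acc, ci)
  | n :: rest, acc, ci, mc =>
    if (acc.length : Int) ≥ mc then (acc, ci)
    else if n > 999999 then (acc, ci)
    else
      let cc := if PySem.Int.mod ci 3 = 0 then "m"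
                else (PySem.List.pyGet? pvCheckChars (PySem.Int.mod ci (pvCheckChars.length : Int))).getD ""
      pvInnerA rest (acc ++ [PySem.Int.toStr n ++ " " ++ cc]) (ci + 1) mc

-- outer `for start, end, step in ranges` loop of A.
def pvOuterA : List (Int × Int × Int) → List String → Int → Int → List String
  | [], acc, _, _ => acc
  | (s, e, st) :: rs, acc, ci, mc =>
    if (acc.length : Int) ≥ mc then acc
    else
      let p := pvInnerA (PySem.List.pyRange s (min e 1000000) st) acc ci mc
      pvOuterA rs p.1 p.2 mc

def get_sample_companies_py (max_count : Int) : List String :=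
  PySem.List.slice (pvOuterA pvRangesA [] 0 max_count) none (some max_count)

-- ===== PORT B =====
def pvCheckCharsB : List String := ["m", "a", "b", "v", "w", "x", "y", "z", "t", "h", "d", "f"]

def pvRangesB : List (Int × Int × Int) :=
  [(1, 1000, 10), (1000, 10000, 50), (10000, 50000, 100), (50000, 100000, 200),
   (100000, 200000, 300), (200000, 400000, 500), (400000, 600000, 800)]

-- lens = [(e - s + st - 1) // st for s, e, st in ranges]
def pvLensB : List Int := pvRangesB.map (fun t => PySem.Int.floordiv (t.2.1 - t.1 + t.2.2 - 1) t.2.2)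

-- total = sum(lens)
def pvTotalB : Int := pvLensB.sum

-- def fnr(i): locate i's range by subtracting range lengths
def pvFnrB : List ((Int × Int × Int) × Int) → Int → Int
  | [], _ => 0
  | (t, len) :: rest, i => if i < len then t.1 + i * t.2.2 else pvFnrB rest (i - len)

def get_sample_companies_py_alt (max_count : Int) : List String :=
  (PySem.List.pyRange 0 (min (max max_count 0) pvTotalB) 1).map (fun i =>
    PySem.Int.toStr (pvFnrB (pvRangesB.zip pvLensB) i) ++ " " ++
      (if PySem.Int.mod i 3 = 0 then "m"
       else (PySem.List.pyGet? pvCheckCharsB (PySem.Int.mod i 12)).getD ""))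

-- ===== PRECONDITION & SPEC =====
def Spec_get_sample_companies_py (max_count : Int) (out : List String) : Prop := out = get_sample_companies_py_alt max_count
instance (max_count : Int) (out : List String) : Decidable (Spec_get_sample_companies_py max_count out) := by unfold Spec_get_sample_companies_py; infer_instance

-- ===== CLAIM =====
def Claim_equal_get_sample_companies_py : Prop := ∀ (max_count : Int), Dom_get_sample_companies_py max_count → Spec_get_sample_companies_py max_count (get_sample_companies_py max_count)

-- ===== LEMMAS AND PROOFS =====

-- the check character assigned to output position ci
def pvGc (ci : Int) : String :=
  if PySem.Int.mod ci 3 = 0 then "m"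
  else (PySem.List.pyGet? pvCheckChars (PySem.Int.mod ci (pvCheckChars.length : Int))).getD ""

-- the strings A emits for a block of numbers starting at output position ci
def pvEmit : Int → List Int → List String
  | _, [] => []
  | ci, n :: r => (PySem.Int.toStr n ++ " " ++ pvGc ci) :: pvEmit (ci + 1) r

theorem pvEmit_length (ci : Int) (xs : List Int) : (pvEmit ci xs).length = xs.length := by
  induction xs generalizing ci with
  | nil => rfl
  | cons n r ih => simp [pvEmit, ih]

theorem pvEmit_take (ci : Int) (xs : List Int) (k : Nat) :
    pvEmit ci (xs.take k) = (pvEmit ci xs).take k := by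
  induction xs generalizing ci k with
  | nil => simp [pvEmit]
  | cons n r ih =>
    cases k with
    | zero => simp [pvEmit]
    | succ k => simp [pvEmit, ih]

theorem pvEmit_append (ci : Int) (xs ys : List Int) :
    pvEmit ci (xs ++ ys) = pvEmit ci xs ++ pvEmit (ci + (xs.length : Int)) ys := by
  induction xs generalizing ci with
  | nil => simp [pvEmit]
  | cons n r ih =>
    simp only [List.cons_append, pvEmit, ih, List.length_cons]
    rw [show ci + ((r.length + 1 : Nat) : Int) = ci + 1 + (r.length : Int) by push_cast; ring]

theorem pvInnerA_eq (nums : List Int) (acc : List String) (ci mc : Int)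
    (hbound : ∀ n ∈ nums, n ≤ 999999) (hci : ci = (acc.length : Int)) :
    pvInnerA nums acc ci mc =
      (acc ++ pvEmit ci (nums.take (mc - ci).toNat),
       ci + (((mc - ci).toNat ⊓ nums.length : Nat) : Int)) := by
  induction nums generalizing acc ci with
  | nil => simp [pvInnerA, pvEmit]
  | cons n r ih =>
    by_cases hge : (acc.length : Int) ≥ mc
    · have h0 : (mc - ci).toNat = 0 := by omega
      simp [pvInnerA, hge, h0, pvEmit]
    · have hk : (mc - ci).toNat = ((mc - ci - 1).toNat) + 1 := by omega
      have hn : ¬ n > 999999 := by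
        have := hbound n (by simp); omega
      rw [show pvInnerA (n :: r) acc ci mc =
            pvInnerA r (acc ++ [PySem.Int.toStr n ++ " " ++ pvGc ci]) (ci + 1) mc by
          simp [pvInnerA, hge, hn, pvGc]]
      rw [ih _ (ci + 1) (fun x hx => hbound x (by simp [hx])) (by simp; omega)]
      rw [hk]
      simp only [Prod.mk.injEq]
      refine ⟨?_, ?_⟩
      · simp only [List.take_succ_cons, pvEmit, List.append_assoc, List.cons_append,
          List.nil_append]
        have : mc - (ci + 1) = mc - ci - 1 := by ring
        rw [this]
      · simp only [List.length_cons]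
        have : mc - (ci + 1) = mc - ci - 1 := by ring
        rw [this]
        omega

theorem pvOuterA_eq (rs : List (Int × Int × Int)) (acc : List String) (ci mc : Int)
    (hbound : ∀ t ∈ rs, ∀ n ∈ PySem.List.pyRange t.1 (min t.2.1 1000000) t.2.2, n ≤ 999999)
    (hci : ci = (acc.length : Int)) :
    pvOuterA rs acc ci mc =
      acc ++ pvEmit ci ((rs.flatMap (fun t => PySem.List.pyRange t.1 (min t.2.1 1000000) t.2.2)).take
        (mc - ci).toNat) := by
  induction rs generalizing acc ci with
  | nil => simp [pvOuterA, pvEmit]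
  | cons t rs ih =>
    obtain ⟨s, e, st⟩ := t
    by_cases hge : (acc.length : Int) ≥ mc
    · have h0 : (mc - ci).toNat = 0 := by omega
      simp [pvOuterA, hge, h0, pvEmit]
    · have hnums := pvInnerA_eq (PySem.List.pyRange s (min e 1000000) st) acc ci mc
        (fun n hn => hbound (s, e, st) (by simp) n hn) hci
      set nums := PySem.List.pyRange s (min e 1000000) st with hnumsdef
      set k : Nat := (mc - ci).toNat with hkdef
      have : pvOuterA ((s, e, st) :: rs) acc ci mc =
          pvOuterA rs (acc ++ pvEmit ci (nums.take k)) (ci + ((k ⊓ nums.length : Nat) : Int)) mc := by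
        show (if (acc.length : Int) ≥ mc then acc
              else pvOuterA rs (pvInnerA nums acc ci mc).1 (pvInnerA nums acc ci mc).2 mc) = _
        rw [if_neg hge, hnums]
      rw [this, ih _ _ (fun t ht n hn => hbound t (by simp [ht]) n hn)
        (by rw [List.length_append, pvEmit_length, List.length_take]; push_cast; omega)]
      rw [List.flatMap_cons, List.take_append, pvEmit_append]
      have h2 : (mc - (ci + ((k ⊓ nums.length : Nat) : Int))).toNat = k - nums.length := by
        omega
      rw [h2]
      have h1 : ci + ((k ⊓ nums.length : Nat) : Int) = ci + ((nums.take k).length : Int) := by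
        simp
      rw [h1, List.append_assoc]

-- the concrete number stream A walks
def pvNumsA : List Int :=
  pvRangesA.flatMap (fun t => PySem.List.pyRange t.1 (min t.2.1 1000000) t.2.2)

set_option maxRecDepth 40000 in
theorem pvNums_bound :
    ∀ t ∈ pvRangesA, ∀ n ∈ PySem.List.pyRange t.1 (min t.2.1 1000000) t.2.2, n ≤ 999999 := by
  decide

theorem pvTotalB_eq : pvTotalB = 1914 := by decide

-- the zipped (range, length) table B's fnr walks, as a literal
def pvZL : List ((Int × Int × Int) × Int) :=
  [((1, 1000, 10), 100), ((1000, 10000, 50), 180), ((10000, 50000, 100), 400),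
   ((50000, 100000, 200), 250), ((100000, 200000, 300), 334),
   ((200000, 400000, 500), 400), ((400000, 600000, 800), 250)]

theorem pvZL_eq : pvRangesB.zip pvLensB = pvZL := by decide

-- a block of consecutive indices mapped through F is one arithmetic-progression range
theorem pvChunk (F : Int → Int) (off off' s st e : Int) (hst : 0 < st)
    (hN : (if s < e then ((e - s + st - 1) / st).toNat else 0) = (off' - off).toNat)
    (hF : ∀ k : Nat, (k : Int) < off' - off → F (off + k) = s + st * k) :
    (PySem.List.pyRange off off' 1).map F = PySem.List.pyRange s e st := by
  rw [PySem.List.pyRange_of_pos s e hst, hN, PySem.List.pyRange_one off off', List.map_map]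
  apply List.map_congr_left
  intro k hk
  have hkL : (k : Int) < off' - off := by
    have := List.mem_range.mp hk; omega
  simpa using hF k hkL

-- A's number stream, element by element, is B's per-index formula
theorem pvNums_eq_map :
    pvNumsA = (PySem.List.pyRange 0 1914 1).map (fun i => pvFnrB pvZL i) := by
  have h1 : pvNumsA =
      PySem.List.pyRange 1 1000 10 ++ (PySem.List.pyRange 1000 10000 50 ++
      (PySem.List.pyRange 10000 50000 100 ++ (PySem.List.pyRange 50000 100000 200 ++
      (PySem.List.pyRange 100000 200000 300 ++ (PySem.List.pyRange 200000 400000 500 ++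
      PySem.List.pyRange 400000 600000 800))))) := by
    norm_num [pvNumsA, pvRangesA]
  rw [h1,
    PySem.List.pyRange_one_append 0 100 1914 (by norm_num) (by norm_num),
    PySem.List.pyRange_one_append 100 280 1914 (by norm_num) (by norm_num),
    PySem.List.pyRange_one_append 280 680 1914 (by norm_num) (by norm_num),
    PySem.List.pyRange_one_append 680 930 1914 (by norm_num) (by norm_num),
    PySem.List.pyRange_one_append 930 1264 1914 (by norm_num) (by norm_num),
    PySem.List.pyRange_one_append 1264 1664 1914 (by norm_num) (by norm_num)]
  simp only [List.map_append]
  rw [pvChunk _ 0 100 1 10 1000 (by norm_num) (by norm_num)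
        (fun k hk => by simp only [pvZL, pvFnrB]; split_ifs <;> omega),
      pvChunk _ 100 280 1000 50 10000 (by norm_num) (by norm_num)
        (fun k hk => by simp only [pvZL, pvFnrB]; split_ifs <;> omega),
      pvChunk _ 280 680 10000 100 50000 (by norm_num) (by norm_num)
        (fun k hk => by simp only [pvZL, pvFnrB]; split_ifs <;> omega),
      pvChunk _ 680 930 50000 200 100000 (by norm_num) (by norm_num)
        (fun k hk => by simp only [pvZL, pvFnrB]; split_ifs <;> omega),
      pvChunk _ 930 1264 100000 300 200000 (by norm_num) (by norm_num)
        (fun k hk => by simp only [pvZL, pvFnrB]; split_ifs <;> omega),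
      pvChunk _ 1264 1664 200000 500 400000 (by norm_num) (by norm_num)
        (fun k hk => by simp only [pvZL, pvFnrB]; split_ifs <;> omega),
      pvChunk _ 1664 1914 400000 800 600000 (by norm_num) (by norm_num)
        (fun k hk => by simp only [pvZL, pvFnrB]; split_ifs <;> omega)]

theorem pvEmit_eq_enumerate_map (xs : List Int) (s : Int) :
    pvEmit s xs = (PySem.List.enumerate xs s).map (fun p =>
      PySem.Int.toStr p.2 ++ " " ++ pvGc p.1) := by
  induction xs generalizing s with
  | nil => simp [pvEmit, PySem.List.enumerate_nil]
  | cons n r ih => rw [PySem.List.enumerate_cons]; simp [pvEmit, ih]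

theorem pvLen : PySem.List.len pvNumsA = 1914 := by
  rw [pvNums_eq_map]
  simp [PySem.List.length_pyRange_one]

-- the full fixed tables (length 1914) of A and B coincide
theorem pvFull_eq :
    pvEmit 0 pvNumsA =
      (PySem.List.pyRange 0 1914 1).map (fun i =>
        PySem.Int.toStr (pvFnrB (pvRangesB.zip pvLensB) i) ++ " " ++
          (if PySem.Int.mod i 3 = 0 then "m"
           else (PySem.List.pyGet? pvCheckCharsB (PySem.Int.mod i 12)).getD "")) := by
  rw [pvEmit_eq_enumerate_map, PySem.List.enumerate_eq_map_pyRange pvNumsA 0, pvLen,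
    List.map_map, pvZL_eq]
  apply List.map_congr_left
  intro j hj
  obtain ⟨hj0, hj1⟩ := (PySem.List.mem_pyRange_one).mp hj
  simp only [Function.comp]
  rw [pvNums_eq_map, PySem.List.pyGetD_map_pyRange_of_nonneg _ 1914 j 0 hj0 hj1]
  rfl

-- ===== VERDICT =====
theorem get_sample_companies_py_spec : Claim_equal_get_sample_companies_py := by
  intro mc _
  unfold Spec_get_sample_companies_py get_sample_companies_py get_sample_companies_py_alt
  rw [pvOuterA_eq pvRangesA [] 0 mc pvNums_bound (by simp), pvTotalB_eq]
  simp only [List.nil_append, Int.sub_zero]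
  rw [show pvRangesA.flatMap (fun t => PySem.List.pyRange t.1 (min t.2.1 1000000) t.2.2) = pvNumsA from rfl]
  by_cases hmc : 0 ≤ mc
  · rw [PySem.List.slice_to _ hmc, pvEmit_take, List.take_take, min_self, pvFull_eq]
    set f : Int → String := fun i =>
      PySem.Int.toStr (pvFnrB (pvRangesB.zip pvLensB) i) ++ " " ++
        (if PySem.Int.mod i 3 = 0 then "m"
         else (PySem.List.pyGet? pvCheckCharsB (PySem.Int.mod i 12)).getD "") with hf
    by_cases hle : mc ≤ 1914
    · rw [show min (max mc 0) 1914 = mc by omega]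
      rw [PySem.List.pyRange_one_append 0 mc 1914 hmc hle, List.map_append]
      rw [show mc.toNat = ((PySem.List.pyRange 0 mc 1).map f).length by
        rw [List.length_map, PySem.List.length_pyRange_one]; omega]
      exact List.take_left
    · rw [show min (max mc 0) 1914 = 1914 by omega]
      apply List.take_of_length_le
      rw [List.length_map, PySem.List.length_pyRange_one]
      omega
  · have h0 : mc.toNat = 0 := by omega
    have hm : min (max mc 0) 1914 = 0 := by omega
    rw [h0, hm]
    simp [List.take_zero, pvEmit, PySem.List.slice, PySem.List.pyRange_one_eq_nil (by omega : (0:Int) <= 0)]
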